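-- pv_equiv track=rewrite | github.com/vaibhav-jain-dev/learning-algo | problems/200-must-solve/graphs/05-river-sizes/python_code.py | river_sizes_bfs
-- ===== SOURCE A (Python) =====
-- from typing import List
-- from collections import deque
--
-- def river_sizes_bfs(matrix: List[List[int]]) -> List[int]:
--     """
--     Find all river sizes using BFS.
--
--     Args:
--         matrix: 2D array of 0s (land) and 1s (water)
--
--     Returns:
--         List of river sizes in no particular order
--     """
--     if not matrix or not matrix[0]:
--         return []
--
--     rows, cols = len(matrix), len(matrix[0])
--     visited = [[False] * cols for _ in range(rows)]
--     sizes = []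
--     directions = [(-1, 0), (1, 0), (0, -1), (0, 1)]
--
--     for row in range(rows):
--         for col in range(cols):
--             if not visited[row][col] and matrix[row][col] == 1:
--                 # BFS from this cell
--                 size = 0
--                 queue = deque([(row, col)])
--                 visited[row][col] = True
--
--                 while queue:
--                     curr_row, curr_col = queue.popleft()
--                     size += 1
--
--                     for dr, dc in directions:
--                         new_row, new_col = curr_row + dr, curr_col + dc
--                         if (0 <= new_row < rows and
--                             0 <= new_col < cols and
--                             not visited[new_row][new_col] and
--                             matrix[new_row][new_col] == 1):
--                             visited[new_row][new_col] = True
--                             queue.append((new_row, new_col))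
--
--                 sizes.append(size)
--
--     return sizes
-- ===== SOURCE B (Python) =====
-- from typing import List
--
--
-- def river_sizes_bfs(matrix: List[List[int]]) -> List[int]:
--     """
--     Find all river sizes with a recursive depth-first flood fill, scanning the
--     grid once through flat linear indices.
--
--     Args:
--         matrix: 2D array of 0s (land) and 1s (water)
--
--     Returns:
--         List of river sizes in no particular order
--     """
--     if not matrix or not matrix[0]:
--         return []
--
--     rows, cols = len(matrix), len(matrix[0])
--     visited = [[False] * cols for _ in range(rows)]
--
--     def flood(r, c):
--         visited[r][c] = True
--         size = 1
--         for nr, nc in ((r - 1, c), (r + 1, c), (r, c - 1), (r, c + 1)):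
--             if 0 <= nr < rows and 0 <= nc < cols and not visited[nr][nc] and matrix[nr][nc] == 1:
--                 size += flood(nr, nc)
--         return size
--
--     sizes = []
--     for idx in range(rows * cols):
--         row, col = divmod(idx, cols)
--         if matrix[row][col] == 1 and not visited[row][col]:
--             sizes.append(flood(row, col))
--     return sizes
-- ===== Notes on version B (the rewrite author's own statement) =====
-- stated objective: alternative
-- what changed: The nested row/column scan with a per-component deque BFS is replaced by a single flat loop over linear indices idx=0..rows*cols-1 (divmod recovers row,col) whose per-component search is a recursive depth-first flood(r,c) returning 1 plus the sum of flood over the four in-bounds, unvisited water neighbours; the flat scan visits cells in the same row-major order, so components are found and their sizes appended in the same order.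
import Mathlib
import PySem

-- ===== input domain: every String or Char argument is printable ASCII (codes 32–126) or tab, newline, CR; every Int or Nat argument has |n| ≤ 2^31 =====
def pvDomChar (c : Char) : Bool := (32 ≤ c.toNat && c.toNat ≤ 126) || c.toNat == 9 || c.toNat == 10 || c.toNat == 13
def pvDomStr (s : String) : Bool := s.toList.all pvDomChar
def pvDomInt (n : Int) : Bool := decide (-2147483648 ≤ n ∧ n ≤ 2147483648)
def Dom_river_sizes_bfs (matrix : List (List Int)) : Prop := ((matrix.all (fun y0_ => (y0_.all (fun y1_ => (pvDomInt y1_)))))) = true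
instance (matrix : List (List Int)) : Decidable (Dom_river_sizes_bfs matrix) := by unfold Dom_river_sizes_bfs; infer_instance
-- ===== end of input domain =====

-- B replaces A's nested row/column scan with a per-component deque BFS by a single flat scan over
-- linear indices (divmod recovers row,col) whose component search is a recursive depth-first
-- flood fill over the four neighbour tuples; same discovery order, so identical output.
-- Objective: alternative. Equality is about the return value only.

-- ===== PORT A =====

-- matrix[r][c] (both bounds are checked by the algorithms before any access; under
-- Pre_ every checked access is in range, so the `.getD` defaults are never used there)
def pvCell (m : List (List Int)) (r c : Int) : Int :=
  (PySem.List.pyGet? ((PySem.List.pyGet? m r).getD []) c).getD 0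

-- 0 <= r < rows and 0 <= c < cols
def pvInb (rows cols r c : Int) : Bool :=
  decide (0 ≤ r) && decide (r < rows) && decide (0 ≤ c) && decide (c < cols)

-- directions = [(-1, 0), (1, 0), (0, -1), (0, 1)]
def pvDirs : List (Int × Int) := [(-1, 0), (1, 0), (0, -1), (0, 1)]

-- the neighbour test `0 <= new < bounds and not visited[new] and matrix[new] == 1`
def pvGood (m : List (List Int)) (rows cols : Int) (V : Finset (Int × Int))
    (q : Int × Int) : Bool :=
  pvInb rows cols q.1 q.2 && decide (q ∉ V) && decide (pvCell m q.1 q.2 = 1)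

-- A's `while queue:` loop; state = (queue, visited, size); fuel only makes it total
-- (rows*cols steps always suffice, proved below)
def pvBfs (m : List (List Int)) (rows cols : Int) :
    Nat → List (Int × Int) → Finset (Int × Int) → Int → Int × Finset (Int × Int)
  | 0, _, V, size => (size, V)
  | _ + 1, [], V, size => (size, V)
  | f + 1, p :: rest, V, size =>
      let st := pvDirs.foldl
        (fun (s : Finset (Int × Int) × List (Int × Int)) d =>
          let q := (p.1 + d.1, p.2 + d.2)
          if pvGood m rows cols s.1 q then (insert q s.1, s.2 ++ [q]) else s)
        (V, rest)
      pvBfs m rows cols f st.2 st.1 (size + 1)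

def river_sizes_bfs (matrix : List (List Int)) : List Int :=
  match matrix with
  | [] => []
  | r0 :: _ =>
    if r0 = [] then [] else
      let rows : Int := matrix.length
      let cols : Int := r0.length
      let fuel : Nat := rows.toNat * cols.toNat
      (((PySem.List.pyRange 0 rows 1).foldl
        (fun (st : Finset (Int × Int) × List Int) r =>
          (PySem.List.pyRange 0 cols 1).foldl
            (fun (st : Finset (Int × Int) × List Int) c =>
              if (r, c) ∉ st.1 ∧ pvCell matrix r c = 1 then
                let out := pvBfs matrix rows cols fuel [(r, c)] (insert (r, c) st.1) 0
                (out.2, st.2 ++ [out.1])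
              else st)
            st)
        (∅, [])) : Finset (Int × Int) × List Int).2

-- ===== PORT B =====

-- matrix[r][c], written as B reads it
def bCell (m : List (List Int)) (r c : Int) : Int :=
  match PySem.List.pyGet? m r with
  | none => 0
  | some line => (PySem.List.pyGet? line c).getD 0

-- B's neighbour test `0 <= nr < rows and 0 <= nc < cols and not visited[nr][nc] and matrix[nr][nc] == 1`
def bAdm (m : List (List Int)) (rows cols : Int) (V : Finset (Int × Int))
    (q : Int × Int) : Bool :=
  decide (0 ≤ q.1 ∧ q.1 < rows) && decide (0 ≤ q.2 ∧ q.2 < cols) &&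
    !(decide (q ∈ V)) && (bCell m q.1 q.2 == 1)

-- the tuple ((r-1, c), (r+1, c), (r, c-1), (r, c+1))
def bNext (p : Int × Int) : List (Int × Int) :=
  [(p.1 - 1, p.2), (p.1 + 1, p.2), (p.1, p.2 - 1), (p.1, p.2 + 1)]

-- B's recursive `flood(r, c)`: mark the cell, then add the flood of each admissible
-- neighbour in turn; fuel only makes the recursion total (rows*cols always suffices)
mutual
def bFlood (m : List (List Int)) (rows cols : Int) :
    Nat → Int × Int → Finset (Int × Int) → Int × Finset (Int × Int)
  | 0, _, V => (0, V)
  | f + 1, p, V => bNbrs m rows cols f (bNext p) 1 (insert p V)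
termination_by f _ _ => (f, 0, 0)
def bNbrs (m : List (List Int)) (rows cols : Int) :
    Nat → List (Int × Int) → Int → Finset (Int × Int) → Int × Finset (Int × Int)
  | _, [], size, V => (size, V)
  | f, q :: qs, size, V =>
      if bAdm m rows cols V q then
        let out := bFlood m rows cols f q V
        bNbrs m rows cols f qs (size + out.1) out.2
      else bNbrs m rows cols f qs size V
termination_by f L _ _ => (f, 1, L.length)
end

-- B's single flat loop `for idx in range(rows * cols): row, col = divmod(idx, cols); …`
def bScan (m : List (List Int)) (rows cols : Int) (fuel : Nat) :
    List Int → Finset (Int × Int) → List Int → Finset (Int × Int) × List Int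
  | [], V, sizes => (V, sizes)
  | idx :: rest, V, sizes =>
      let row := PySem.Int.floordiv idx cols
      let col := PySem.Int.mod idx cols
      if bCell m row col == 1 && !(decide ((row, col) ∈ V)) then
        let out := bFlood m rows cols fuel (row, col) V
        bScan m rows cols fuel rest out.2 (sizes ++ [out.1])
      else bScan m rows cols fuel rest V sizes

def river_sizes_bfs_alt (matrix : List (List Int)) : List Int :=
  match matrix with
  | [] => []
  | r0 :: _ =>
    if r0 = [] then [] else
      let rows : Int := matrix.length
      let cols : Int := r0.length
      let fuel : Nat := rows.toNat * cols.toNat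
      (bScan matrix rows cols fuel (PySem.List.pyRange 0 (rows * cols) 1) ∅ []).2

-- ===== PRECONDITION & SPEC =====

-- Pre_ excludes exactly the ragged matrices with a row shorter than the first row, on which
-- Python A (and B alike) raises IndexError when it probes that row.
def Pre_river_sizes_bfs (matrix : List (List Int)) : Prop :=
  ∀ row ∈ matrix, (matrix.head?.getD []).length ≤ row.length
instance (matrix : List (List Int)) : Decidable (Pre_river_sizes_bfs matrix) := by
  unfold Pre_river_sizes_bfs; infer_instance

def pvWitness_river_sizes_bfs : List (List Int) := [[1, 0, 1], [1, 1, 0]]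

def Spec_river_sizes_bfs (matrix : List (List Int)) (out : List Int) : Prop :=
  out = river_sizes_bfs_alt matrix
instance (matrix : List (List Int)) (out : List Int) : Decidable (Spec_river_sizes_bfs matrix out) := by
  unfold Spec_river_sizes_bfs; infer_instance

-- ===== CLAIM (what is proved, stated in full; the proofs are below) =====
def Claim_equal_river_sizes_bfs : Prop := ∀ (matrix : List (List Int)), Dom_river_sizes_bfs matrix → Pre_river_sizes_bfs matrix → Spec_river_sizes_bfs matrix (river_sizes_bfs matrix)

-- ===== LEMMAS AND PROOFS =====

-- a reference flood fill, used only by the proofs: the same recursion as bFlood but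
-- phrased as a fold over A's direction list, the common ground between the two ports
def pvFlood (m : List (List Int)) (rows cols : Int) :
    Nat → Int × Int → Finset (Int × Int) → Int × Finset (Int × Int)
  | 0, _, V => (0, V)
  | f + 1, p, V =>
      pvDirs.foldl
        (fun (s : Int × Finset (Int × Int)) d =>
          let q := (p.1 + d.1, p.2 + d.2)
          if pvGood m rows cols s.2 q then
            let out := pvFlood m rows cols f q s.2
            (s.1 + out.1, out.2)
          else s)
        (1, insert p V)

-- the grid of in-bounds cells
def pvAll (rows cols : Int) : Finset (Int × Int) :=
  ((Finset.range rows.toNat) ×ˢ (Finset.range cols.toNat)).image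
    (fun p => ((p.1 : Int), (p.2 : Int)))

-- q is one of the four lattice neighbours of p
def pvNbr (p q : Int × Int) : Prop :=
  q = (p.1 - 1, p.2) ∨ q = (p.1 + 1, p.2) ∨ q = (p.1, p.2 - 1) ∨ q = (p.1, p.2 + 1)

-- q is admissible relative to visited set V: in bounds, water, unvisited
def pvOk (m : List (List Int)) (rows cols : Int) (V : Finset (Int × Int))
    (q : Int × Int) : Prop :=
  pvInb rows cols q.1 q.2 = true ∧ pvCell m q.1 q.2 = 1 ∧ q ∉ V

-- cells reachable from s through admissible cells (s itself always reachable)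
def pvReach (m : List (List Int)) (rows cols : Int) (V : Finset (Int × Int))
    (s : Int × Int) : Set (Int × Int) :=
  {x | Relation.ReflTransGen (fun a b => pvNbr a b ∧ pvOk m rows cols V b) s x}

theorem pvNbr_of_dir (p : Int × Int) (d : Int × Int) (hd : d ∈ pvDirs) :
    pvNbr p (p.1 + d.1, p.2 + d.2) := by
  simp only [pvDirs, List.mem_cons, List.not_mem_nil, or_false] at hd
  rcases hd with h | h | h | h <;> subst h <;> simp [pvNbr] <;> omega

theorem pvNbr_iff_dir (p q : Int × Int) :
    pvNbr p q ↔ ∃ d ∈ pvDirs, q = (p.1 + d.1, p.2 + d.2) := by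
  constructor
  · rintro (h | h | h | h) <;> subst h
    · exact ⟨(-1, 0), by simp [pvDirs], by simp; ring⟩
    · exact ⟨(1, 0), by simp [pvDirs], by simp⟩
    · exact ⟨(0, -1), by simp [pvDirs], by simp; ring⟩
    · exact ⟨(0, 1), by simp [pvDirs], by simp⟩
  · rintro ⟨d, hd, rfl⟩; exact pvNbr_of_dir p d hd

theorem pvMem_all {rows cols : Int} {p : Int × Int} :
    p ∈ pvAll rows cols ↔ pvInb rows cols p.1 p.2 = true := by
  simp only [pvAll, Finset.mem_image, Finset.mem_product, Finset.mem_range, pvInb,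
    Bool.and_eq_true, decide_eq_true_eq]
  constructor
  · rintro ⟨⟨i, j⟩, ⟨hi, hj⟩, rfl⟩
    refine ⟨⟨⟨by positivity, ?_⟩, by positivity⟩, ?_⟩ <;> simp <;> omega
  · rintro ⟨⟨⟨h1, h2⟩, h3⟩, h4⟩
    refine ⟨(p.1.toNat, p.2.toNat), ⟨by omega, by omega⟩, ?_⟩
    simp only []
    rw [Int.toNat_of_nonneg h1, Int.toNat_of_nonneg h3]

theorem pvAll_card (rows cols : Int) :
    (pvAll rows cols).card = rows.toNat * cols.toNat := by
  unfold pvAll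
  rw [Finset.card_image_of_injective _ (by
    rintro ⟨a, b⟩ ⟨c, d⟩ h
    simp only [Prod.mk.injEq, Nat.cast_inj] at h
    simp [h.1, h.2])]
  simp [Finset.card_product]

-- chained difference count: V ⊆ A ⊆ B → |B \ V| = |A \ V| + |B \ A|
theorem pvCard_sdiff_chain {V A B : Finset (Int × Int)} (h1 : V ⊆ A) (h2 : A ⊆ B) :
    (B \ V).card = (A \ V).card + (B \ A).card := by
  have hVB : V ⊆ B := h1.trans h2
  have h3 : A \ V ⊆ B \ V := Finset.sdiff_subset_sdiff h2 (le_refl V)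
  have e1 := Finset.card_sdiff_add_card_eq_card h1
  have e2 := Finset.card_sdiff_add_card_eq_card h2
  have e3 := Finset.card_sdiff_add_card_eq_card hVB
  omega

-- reachability is monotone when the avoided set shrinks
theorem pvReach_mono {m : List (List Int)} {rows cols : Int} {V W : Finset (Int × Int)}
    (hVW : V ⊆ W) {s x : Int × Int} (hx : x ∈ pvReach m rows cols W s) :
    x ∈ pvReach m rows cols V s := by
  refine Relation.ReflTransGen.mono ?_ hx
  rintro a b ⟨hn, h1, h2, h3⟩
  exact ⟨hn, h1, h2, fun hb => h3 (hVW hb)⟩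

-- a sound and closed superset containing s captures exactly the reachable cells
theorem pvClosure {m : List (List Int)} {rows cols : Int} {V₀ V' : Finset (Int × Int)}
    {s : Int × Int} (hs : s ∈ V') (hs0 : s ∉ V₀)
    (hcl : ∀ x ∈ V', x ∉ V₀ → ∀ q, pvNbr x q → pvInb rows cols q.1 q.2 = true →
      pvCell m q.1 q.2 = 1 → q ∈ V')
    {x : Int × Int} (hx : x ∈ pvReach m rows cols V₀ s) : x ∈ V' ∧ x ∉ V₀ := by
  induction hx with
  | refl => exact ⟨hs, hs0⟩
  | tail _ h ih =>
      obtain ⟨hn, h1, h2, h3⟩ := h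
      exact ⟨hcl _ ih.1 ih.2 _ hn h1 h2, h3⟩

-- ---- specification of the reference flood fill ----

-- removing one fresh in-bounds cell from the unvisited pool drops its size by one
theorem pvSdiff_insert_card {rows cols : Int} {W : Finset (Int × Int)} {q : Int × Int}
    (hq : q ∈ pvAll rows cols) (hqW : q ∉ W) :
    (pvAll rows cols \ W).card = (pvAll rows cols \ insert q W).card + 1 := by
  have he : pvAll rows cols \ insert q W = (pvAll rows cols \ W).erase q := by
    ext x
    simp only [Finset.mem_sdiff, Finset.mem_insert, Finset.mem_erase]
    tauto
  have hm : q ∈ pvAll rows cols \ W := by simp [Finset.mem_sdiff, hq, hqW]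
  rw [he, Finset.card_erase_of_mem hm]
  have := Finset.card_pos.mpr ⟨q, hm⟩
  omega

theorem pvFlood_fold (m : List (List Int)) (rows cols : Int) (f' : Nat)
    (IH : ∀ (V : Finset (Int × Int)) (p : Int × Int), pvOk m rows cols V p →
      (pvAll rows cols \ V).card ≤ f' →
      V ⊆ (pvFlood m rows cols f' p V).2 ∧ p ∈ (pvFlood m rows cols f' p V).2 ∧
      (∀ x ∈ (pvFlood m rows cols f' p V).2, x ∉ V → x ∈ pvReach m rows cols V p) ∧
      (∀ x ∈ (pvFlood m rows cols f' p V).2, x ∉ V → ∀ q, pvNbr x q →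
        pvInb rows cols q.1 q.2 = true → pvCell m q.1 q.2 = 1 →
        q ∈ (pvFlood m rows cols f' p V).2) ∧
      (pvFlood m rows cols f' p V).1 = (((pvFlood m rows cols f' p V).2 \ V).card : Int)) :
    ∀ (L : List (Int × Int)) (p : Int × Int) (V : Finset (Int × Int))
      (s : Int × Finset (Int × Int)),
      (∀ d ∈ L, d ∈ pvDirs) →
      pvOk m rows cols V p →
      (pvAll rows cols \ insert p V).card ≤ f' →
      insert p V ⊆ s.2 →
      (∀ x ∈ s.2, x ∉ V → x ∈ pvReach m rows cols V p) →
      (∀ x ∈ s.2, x ∉ insert p V → ∀ q, pvNbr x q → pvInb rows cols q.1 q.2 = true →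
        pvCell m q.1 q.2 = 1 → q ∈ s.2) →
      s.1 = (((s.2 \ V).card : Nat) : Int) →
      ∀ t, L.foldl
        (fun (s : Int × Finset (Int × Int)) d =>
          let q := (p.1 + d.1, p.2 + d.2)
          if pvGood m rows cols s.2 q then
            let out := pvFlood m rows cols f' q s.2
            (s.1 + out.1, out.2)
          else s) s = t →
      s.2 ⊆ t.2 ∧
      (∀ x ∈ t.2, x ∉ V → x ∈ pvReach m rows cols V p) ∧
      (∀ x ∈ t.2, x ∉ insert p V → ∀ q, pvNbr x q → pvInb rows cols q.1 q.2 = true →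
        pvCell m q.1 q.2 = 1 → q ∈ t.2) ∧
      (∀ d ∈ L, pvInb rows cols (p.1 + d.1) (p.2 + d.2) = true →
        pvCell m (p.1 + d.1) (p.2 + d.2) = 1 → (p.1 + d.1, p.2 + d.2) ∈ t.2) ∧
      t.1 = (((t.2 \ V).card : Nat) : Int) := by
  intro L
  induction L with
  | nil =>
      intro p V s _ _ _ _ hsound hclosed hcount t ht
      subst ht
      exact ⟨Finset.Subset.refl _, hsound, hclosed, by simp, hcount⟩
  | cons d L' ihL =>
      intro p V s hL hok hfuel hsub hsound hclosed hcount t ht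
      rw [List.foldl_cons] at ht
      by_cases hg : pvGood m rows cols s.2 (p.1 + d.1, p.2 + d.2) = true
      · -- the neighbour is expanded by a recursive flood
        simp only [hg, if_pos] at ht
        have hgood : (pvInb rows cols (p.1 + d.1) (p.2 + d.2) = true ∧
            (p.1 + d.1, p.2 + d.2) ∉ s.2) ∧ pvCell m (p.1 + d.1) (p.2 + d.2) = 1 := by
          simpa [pvGood] using hg
        obtain ⟨⟨hinb, hqs⟩, hcell⟩ := hgood
        have hVs : V ⊆ s.2 := (Finset.subset_insert p V).trans hsub
        have hrec := IH s.2 (p.1 + d.1, p.2 + d.2) ⟨hinb, hcell, hqs⟩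
          (le_trans (Finset.card_le_card
            (Finset.sdiff_subset_sdiff (Finset.Subset.refl _) hsub)) hfuel)
        obtain ⟨hsub2, hqmem2, hsound2, hclosed2, hcard2⟩ := hrec
        set out := pvFlood m rows cols f' (p.1 + d.1, p.2 + d.2) s.2 with hout
        -- step p → q is admissible relative to V
        have hstep : pvNbr p (p.1 + d.1, p.2 + d.2) ∧
            pvOk m rows cols V (p.1 + d.1, p.2 + d.2) :=
          ⟨pvNbr_of_dir p d (hL d (List.mem_cons_self)),
           ⟨hinb, hcell, fun hx => hqs (hVs hx)⟩⟩
        have hres := ihL p V (s.1 + out.1, out.2)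
          (fun e he => hL e (List.mem_cons_of_mem d he)) hok hfuel
          (hsub.trans hsub2)
          (by
            intro x hx hxV
            by_cases hxs : x ∈ s.2
            · exact hsound x hxs hxV
            · have := hsound2 x hx hxs
              have hxq : x ∈ pvReach m rows cols V (p.1 + d.1, p.2 + d.2) :=
                pvReach_mono hVs this
              exact Relation.ReflTransGen.trans
                (Relation.ReflTransGen.single hstep) hxq)
          (by
            intro x hx hxV q hq hqi hqc
            by_cases hxs : x ∈ s.2
            · exact hsub2 (hclosed x hxs hxV q hq hqi hqc)
            · exact hclosed2 x hx hxs q hq hqi hqc)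
          (by
            have := pvCard_sdiff_chain hVs hsub2
            rw [hcount, hcard2]
            push_cast
            omega)
          t ht
        obtain ⟨hmono, rsound, rclosed, rproc, rcount⟩ := hres
        refine ⟨hsub2.trans hmono, rsound, rclosed, ?_, rcount⟩
        intro e he hei hec
        rcases List.mem_cons.mp he with rfl | he'
        · exact hmono hqmem2
        · exact rproc e he' hei hec
      · -- the neighbour fails the test; if it is in-bounds water it was already visited
        simp only [hg, if_neg, Bool.not_eq_true] at ht
        have hres := ihL p V s (fun e he => hL e (List.mem_cons_of_mem d he)) hok hfuel
          hsub hsound hclosed hcount t ht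
        obtain ⟨hmono, rsound, rclosed, rproc, rcount⟩ := hres
        refine ⟨hmono, rsound, rclosed, ?_, rcount⟩
        intro e he hei hec
        rcases List.mem_cons.mp he with rfl | he'
        · -- pvGood is false while bounds and water hold, so the cell is in s.2 already
          have : (p.1 + e.1, p.2 + e.2) ∈ s.2 := by
            by_contra hx
            apply hg
            simp [pvGood, hei, hec, hx]
          exact hmono this
        · exact rproc e he' hei hec

theorem pvFlood_spec (m : List (List Int)) (rows cols : Int) :
    ∀ (f : Nat) (V : Finset (Int × Int)) (p : Int × Int),
      pvOk m rows cols V p →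
      (pvAll rows cols \ V).card ≤ f →
      V ⊆ (pvFlood m rows cols f p V).2 ∧
      p ∈ (pvFlood m rows cols f p V).2 ∧
      (∀ x ∈ (pvFlood m rows cols f p V).2, x ∉ V → x ∈ pvReach m rows cols V p) ∧
      (∀ x ∈ (pvFlood m rows cols f p V).2, x ∉ V → ∀ q, pvNbr x q →
        pvInb rows cols q.1 q.2 = true → pvCell m q.1 q.2 = 1 →
        q ∈ (pvFlood m rows cols f p V).2) ∧
      (pvFlood m rows cols f p V).1 = (((pvFlood m rows cols f p V).2 \ V).card : Int) := by
  intro f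
  induction f with
  | zero =>
      intro V p hok hfuel
      exfalso
      have hm : p ∈ pvAll rows cols \ V := by
        simp only [Finset.mem_sdiff]
        exact ⟨pvMem_all.mpr hok.1, hok.2.2⟩
      have := Finset.card_pos.mpr ⟨p, hm⟩
      omega
  | succ f ih =>
      intro V p hok hfuel
      have hpall : p ∈ pvAll rows cols := pvMem_all.mpr hok.1
      have hfuel' : (pvAll rows cols \ insert p V).card ≤ f := by
        have := pvSdiff_insert_card hpall hok.2.2
        omega
      have hins : insert p V \ V = {p} := by
        ext x
        simp only [Finset.mem_sdiff, Finset.mem_insert, Finset.mem_singleton]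
        constructor
        · rintro ⟨rfl | hx, hnx⟩
          · rfl
          · exact absurd hx hnx
        · rintro rfl; exact ⟨Or.inl rfl, hok.2.2⟩
      have hres := pvFlood_fold m rows cols f (ih) pvDirs p V (1, insert p V)
        (fun d hd => hd) hok hfuel' (Finset.Subset.refl _)
        (by
          intro x hx hxV
          have : x = p := by
            rcases Finset.mem_insert.mp hx with h | h
            · exact h
            · exact absurd h hxV
          subst this
          exact Relation.ReflTransGen.refl)
        (by intro x hx hx'; exact absurd hx hx')
        (by simp [hins])
        (pvFlood m rows cols (f + 1) p V) (by simp only [pvFlood])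
      obtain ⟨hmono, rsound, rclosed, rproc, rcount⟩ := hres
      have hsubV : V ⊆ (pvFlood m rows cols (f + 1) p V).2 :=
        (Finset.subset_insert p V).trans hmono
      have hpmem : p ∈ (pvFlood m rows cols (f + 1) p V).2 :=
        hmono (Finset.mem_insert_self p V)
      refine ⟨hsubV, hpmem, rsound, ?_, rcount⟩
      intro x hx hxV q hq hqi hqc
      by_cases hxp : x = p
      · subst hxp
        obtain ⟨d, hd, rfl⟩ := (pvNbr_iff_dir x q).mp hq
        exact rproc d hd hqi hqc
      · exact rclosed x hx (by simp [Finset.mem_insert, hxp, hxV]) q hq hqi hqc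

-- ---- specification of A's BFS loop ----

-- invariant of A's neighbour-expansion fold, relative to the pre-pop visited set V,
-- the visited set V₀ before this BFS started, and the queue tail `rest`
def pvBInv (m : List (List Int)) (rows cols : Int) (V V₀ : Finset (Int × Int))
    (rest : List (Int × Int)) (s₀ : Int × Int) (st : Finset (Int × Int) × List (Int × Int)) :
    Prop :=
  V ⊆ st.1 ∧
  (∀ x ∈ st.2, x ∈ st.1) ∧
  st.2.Nodup ∧
  (∀ x ∈ st.1, x ∉ V → x ∈ st.2) ∧
  (∀ x ∈ st.2, x ∉ rest → x ∉ V) ∧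
  (∀ x ∈ rest, x ∈ st.2) ∧
  ((st.2.length : Int) = (rest.length : Int) + (((st.1 \ V).card : Nat) : Int)) ∧
  (∀ x ∈ st.1, x ∉ V₀ → x ∈ pvReach m rows cols V₀ s₀) ∧
  ((pvAll rows cols \ st.1).card + st.2.length = (pvAll rows cols \ V).card + rest.length)

theorem pvBfs_fold (m : List (List Int)) (rows cols : Int)
    (V V₀ : Finset (Int × Int)) (rest : List (Int × Int)) (s₀ p : Int × Int)
    (hpV : p ∈ V) (hpV₀ : p ∉ V₀) (hVV₀ : V₀ ⊆ V) :
    ∀ (L : List (Int × Int)) (st : Finset (Int × Int) × List (Int × Int)),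
      (∀ d ∈ L, d ∈ pvDirs) →
      pvBInv m rows cols V V₀ rest s₀ st →
      ∀ t, L.foldl
        (fun (s : Finset (Int × Int) × List (Int × Int)) d =>
          let q := (p.1 + d.1, p.2 + d.2)
          if pvGood m rows cols s.1 q then (insert q s.1, s.2 ++ [q]) else s) st = t →
      st.1 ⊆ t.1 ∧ pvBInv m rows cols V V₀ rest s₀ t ∧
      (∀ d ∈ L, pvInb rows cols (p.1 + d.1) (p.2 + d.2) = true →
        pvCell m (p.1 + d.1) (p.2 + d.2) = 1 → (p.1 + d.1, p.2 + d.2) ∈ t.1) := by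
  intro L
  induction L with
  | nil =>
      intro st _ hinv t ht
      subst ht
      exact ⟨Finset.Subset.refl _, hinv, by simp⟩
  | cons d L' ihL =>
      intro st hL hinv t ht
      rw [List.foldl_cons] at ht
      obtain ⟨i1, i2, i3, i4, i5, i6, i7, i8, i9⟩ := hinv
      by_cases hg : pvGood m rows cols st.1 (p.1 + d.1, p.2 + d.2) = true
      · simp only [hg, if_pos] at ht
        have hgood : (pvInb rows cols (p.1 + d.1) (p.2 + d.2) = true ∧
            (p.1 + d.1, p.2 + d.2) ∉ st.1) ∧ pvCell m (p.1 + d.1) (p.2 + d.2) = 1 := by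
          simpa [pvGood] using hg
        obtain ⟨⟨hinb, hqs⟩, hcell⟩ := hgood
        set q : Int × Int := (p.1 + d.1, p.2 + d.2) with hq
        have hqall : q ∈ pvAll rows cols := pvMem_all.mpr hinb
        have hqV : q ∉ V := fun hx => hqs (i1 hx)
        have hinv' : pvBInv m rows cols V V₀ rest s₀ (insert q st.1, st.2 ++ [q]) := by
          refine ⟨i1.trans (Finset.subset_insert q st.1), ?_, ?_, ?_, ?_, ?_, ?_, ?_, ?_⟩
          · intro x hx
            rcases List.mem_append.mp hx with hx | hx
            · exact Finset.mem_insert_of_mem (i2 x hx)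
            · simp only [List.mem_singleton] at hx
              subst hx
              exact Finset.mem_insert_self _ _
          · refine List.Nodup.append i3 (List.nodup_singleton q) ?_
            intro x hx hx'
            simp only [List.mem_singleton] at hx'
            subst hx'
            exact hqs (i2 q hx)
          · intro x hx hxq
            rcases Finset.mem_insert.mp hx with rfl | hx'
            · exact List.mem_append.mpr (Or.inr (List.mem_singleton_self _))
            · exact List.mem_append.mpr (Or.inl (i4 x hx' hxq))
          · intro x hx hxr
            rcases List.mem_append.mp hx with hx' | hx'
            · exact i5 x hx' hxr
            · simp only [List.mem_singleton] at hx'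
              subst hx'
              exact hqV
          · intro x hx
            exact List.mem_append.mpr (Or.inl (i6 x hx))
          · have : (insert q st.1 \ V).card = (st.1 \ V).card + 1 := by
              have he : insert q st.1 \ V = insert q (st.1 \ V) := by
                ext x
                simp only [Finset.mem_sdiff, Finset.mem_insert]
                constructor
                · rintro ⟨rfl | hx, hnx⟩
                  · exact Or.inl rfl
                  · exact Or.inr ⟨hx, hnx⟩
                · rintro (rfl | ⟨hx, hnx⟩)
                  · exact ⟨Or.inl rfl, hqV⟩
                  · exact ⟨Or.inr hx, hnx⟩
              rw [he, Finset.card_insert_of_notMem (by simp [Finset.mem_sdiff, hqs])]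
            simp only [List.length_append, List.length_singleton]
            push_cast
            rw [this] at *
            push_cast
            omega
          · intro x hx hxV₀
            rcases Finset.mem_insert.mp hx with rfl | hx'
            · have hp : p ∈ pvReach m rows cols V₀ s₀ := i8 p (i1 hpV) hpV₀
              refine Relation.ReflTransGen.tail hp ?_
              refine ⟨pvNbr_of_dir p d (hL d List.mem_cons_self), hinb, hcell, ?_⟩
              intro hx
              exact hqV (hVV₀ hx)
            · exact i8 x hx' hxV₀
          · have := pvSdiff_insert_card (W := st.1) hqall hqs
            simp only [List.length_append, List.length_singleton]
            omega
        have hres := ihL (insert q st.1, st.2 ++ [q])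
          (fun e he => hL e (List.mem_cons_of_mem d he)) hinv' t ht
        obtain ⟨hmono, rinv, rproc⟩ := hres
        refine ⟨(Finset.subset_insert q st.1).trans hmono, rinv, ?_⟩
        intro e he hei hec
        rcases List.mem_cons.mp he with rfl | he'
        · exact hmono (Finset.mem_insert_self _ _)
        · exact rproc e he' hei hec
      · simp only [hg, if_neg, Bool.not_eq_true] at ht
        have hres := ihL st (fun e he => hL e (List.mem_cons_of_mem d he))
          ⟨i1, i2, i3, i4, i5, i6, i7, i8, i9⟩ t ht
        obtain ⟨hmono, rinv, rproc⟩ := hres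
        refine ⟨hmono, rinv, ?_⟩
        intro e he hei hec
        rcases List.mem_cons.mp he with rfl | he'
        · have : (p.1 + e.1, p.2 + e.2) ∈ st.1 := by
            by_contra hx
            apply hg
            simp [pvGood, hei, hec, hx]
          exact hmono this
        · exact rproc e he' hei hec

theorem pvBfs_spec (m : List (List Int)) (rows cols : Int) :
    ∀ (f : Nat) (queue : List (Int × Int)) (V : Finset (Int × Int)) (size : Int)
      (V₀ : Finset (Int × Int)) (s : Int × Int),
      (∀ x ∈ queue, x ∈ V) →
      queue.Nodup →
      (∀ x ∈ queue, x ∉ V₀) →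
      insert s V₀ ⊆ V →
      (∀ x ∈ V, x ∉ V₀ → x ∈ pvReach m rows cols V₀ s) →
      (∀ x ∈ V, x ∉ V₀ → x ∉ queue → ∀ q, pvNbr x q →
        pvInb rows cols q.1 q.2 = true → pvCell m q.1 q.2 = 1 → q ∈ V) →
      size + (queue.length : Int) = (((V \ V₀).card : Nat) : Int) →
      (pvAll rows cols \ V).card + queue.length ≤ f →
      V ⊆ (pvBfs m rows cols f queue V size).2 ∧
      (∀ x ∈ (pvBfs m rows cols f queue V size).2, x ∉ V₀ → x ∈ pvReach m rows cols V₀ s) ∧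
      (∀ x ∈ (pvBfs m rows cols f queue V size).2, x ∉ V₀ → ∀ q, pvNbr x q →
        pvInb rows cols q.1 q.2 = true → pvCell m q.1 q.2 = 1 →
        q ∈ (pvBfs m rows cols f queue V size).2) ∧
      (pvBfs m rows cols f queue V size).1 =
        ((((pvBfs m rows cols f queue V size).2 \ V₀).card : Nat) : Int) := by
  intro f
  induction f with
  | zero =>
      intro queue V size V₀ s hq hnd hqV₀ hsub hsound hclosed hcount hfuel
      have hq0 : queue = [] := List.length_eq_zero_iff.mp (by omega)
      subst hq0
      simp only [pvBfs]
      refine ⟨Finset.Subset.refl _, hsound, ?_, ?_⟩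
      · intro x hx hxV₀ q hnbr hqi hqc
        exact hclosed x hx hxV₀ (by simp) q hnbr hqi hqc
      · simpa using hcount
  | succ f ih =>
      intro queue V size V₀ s hq hnd hqV₀ hsub hsound hclosed hcount hfuel
      match queue with
      | [] =>
          simp only [pvBfs]
          refine ⟨Finset.Subset.refl _, hsound, ?_, ?_⟩
          · intro x hx hxV₀ q hnbr hqi hqc
            exact hclosed x hx hxV₀ (by simp) q hnbr hqi hqc
          · simpa using hcount
      | p :: rest =>
          have hpV : p ∈ V := hq p List.mem_cons_self
          have hpV₀ : p ∉ V₀ := hqV₀ p List.mem_cons_self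
          have hVV₀ : V₀ ⊆ V := (Finset.subset_insert s V₀).trans hsub
          have hinv0 : pvBInv m rows cols V V₀ rest s (V, rest) := by
            refine ⟨Finset.Subset.refl _, ?_, (List.nodup_cons.mp hnd).2, ?_, ?_, ?_, ?_,
              hsound, ?_⟩
            · intro x hx; exact hq x (List.mem_cons_of_mem p hx)
            · intro x hx hxV; exact absurd hx hxV
            · intro x hx hxr; exact absurd hx hxr
            · intro x hx; exact hx
            · simp
            · rfl
          have hfold := pvBfs_fold m rows cols V V₀ rest s p hpV hpV₀ hVV₀ pvDirs
            (V, rest) (fun d hd => hd) hinv0 _ rfl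
          obtain ⟨hmono, ⟨j1, j2, j3, j4, j5, j6, j7, j8, j9⟩, hproc⟩ := hfold
          set st := pvDirs.foldl
            (fun (s : Finset (Int × Int) × List (Int × Int)) d =>
              let q := (p.1 + d.1, p.2 + d.2)
              if pvGood m rows cols s.1 q then (insert q s.1, s.2 ++ [q]) else s)
            (V, rest) with hst
          have hchain := pvCard_sdiff_chain hVV₀ j1
          have hrec := ih st.2 st.1 (size + 1) V₀ s j2 j3
            (by
              intro x hx
              by_cases hxr : x ∈ rest
              · exact hqV₀ x (List.mem_cons_of_mem p hxr)
              · intro hx'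
                exact j5 x hx hxr (hVV₀ hx'))
            (hsub.trans j1) j8
            (by
              intro x hx hxV₀ hxq q hnbr hqi hqc
              by_cases hxV : x ∈ V
              · by_cases hxp : x = p
                · subst hxp
                  obtain ⟨d, hd, rfl⟩ := (pvNbr_iff_dir x q).mp hnbr
                  exact hproc d hd hqi hqc
                · have hxr : x ∉ rest := fun h => hxq (j6 x h)
                  have : x ∉ p :: rest := by
                    simp [List.mem_cons, hxp, hxr]
                  exact j1 (hclosed x hxV hxV₀ this q hnbr hqi hqc)
              · exact absurd (j4 x hx hxV) hxq)
            (by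
              simp only [List.length_cons] at hcount
              push_cast at hcount j7 ⊢
              omega)
            (by
              simp only [List.length_cons] at hfuel
              omega)
          have heq : pvBfs m rows cols (f + 1) (p :: rest) V size =
              pvBfs m rows cols f st.2 st.1 (size + 1) := by
            rw [hst]
            rfl
          rw [heq]
          obtain ⟨k1, k2, k3, k4⟩ := hrec
          exact ⟨(j1.trans k1 : V ⊆ _), k2, k3, k4⟩

-- the two inner searches agree: same new visited set, same count
theorem pvInner_eq (m : List (List Int)) (rows cols : Int) (V₀ : Finset (Int × Int))
    (s : Int × Int) (hok : pvOk m rows cols V₀ s)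
    (hfuel : (pvAll rows cols).card ≤ rows.toNat * cols.toNat) :
    pvBfs m rows cols (rows.toNat * cols.toNat) [s] (insert s V₀) 0 =
      pvFlood m rows cols (rows.toNat * cols.toNat) s V₀ := by
  obtain ⟨hinb, hcell, hsV₀⟩ := hok
  have hsall : s ∈ pvAll rows cols := pvMem_all.mpr hinb
  have hcardV₀ : (pvAll rows cols \ V₀).card ≤ rows.toNat * cols.toNat :=
    le_trans (Finset.card_le_card (Finset.sdiff_subset)) hfuel
  obtain ⟨hF1, hF2, hF3, hF4, hF5⟩ :=
    pvFlood_spec m rows cols (rows.toNat * cols.toNat) V₀ s ⟨hinb, hcell, hsV₀⟩ hcardV₀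
  have hins : insert s V₀ \ V₀ = {s} := by
    ext x
    simp only [Finset.mem_sdiff, Finset.mem_insert, Finset.mem_singleton]
    constructor
    · rintro ⟨rfl | hx, hnx⟩
      · rfl
      · exact absurd hx hnx
    · rintro rfl; exact ⟨Or.inl rfl, hsV₀⟩
  obtain ⟨hB1, hB2, hB3, hB4⟩ :=
    pvBfs_spec m rows cols (rows.toNat * cols.toNat) [s] (insert s V₀) 0 V₀ s
      (by intro x hx; simp only [List.mem_singleton] at hx; subst hx;
          exact Finset.mem_insert_self _ _)
      (List.nodup_singleton s)
      (by intro x hx; simp only [List.mem_singleton] at hx; subst hx; exact hsV₀)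
      (Finset.Subset.refl _)
      (by
        intro x hx hxV₀
        rcases Finset.mem_insert.mp hx with rfl | hx'
        · exact Relation.ReflTransGen.refl
        · exact absurd hx' hxV₀)
      (by
        intro x hx hxV₀ hxq
        rcases Finset.mem_insert.mp hx with rfl | hx'
        · exact absurd (List.mem_singleton_self x) hxq
        · exact absurd hx' hxV₀)
      (by simp [hins])
      (by
        have := pvSdiff_insert_card hsall hsV₀
        simp only [List.length_singleton]
        omega)
  have hsF : s ∈ (pvFlood m rows cols (rows.toNat * cols.toNat) s V₀).2 := hF2
  have hsB : s ∈ (pvBfs m rows cols (rows.toNat * cols.toNat) [s] (insert s V₀) 0).2 :=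
    hB1 (Finset.mem_insert_self _ _)
  have hset : (pvBfs m rows cols (rows.toNat * cols.toNat) [s] (insert s V₀) 0).2 =
      (pvFlood m rows cols (rows.toNat * cols.toNat) s V₀).2 := by
    ext x
    constructor
    · intro hx
      by_cases hxV₀ : x ∈ V₀
      · exact hF1 hxV₀
      · exact (pvClosure hsF hsV₀ hF4 (hB2 x hx hxV₀)).1
    · intro hx
      by_cases hxV₀ : x ∈ V₀
      · exact hB1 (Finset.mem_insert_of_mem hxV₀)
      · exact (pvClosure hsB hsV₀ hB3 (hF3 x hx hxV₀)).1
  have hfst : (pvBfs m rows cols (rows.toNat * cols.toNat) [s] (insert s V₀) 0).1 =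
      (pvFlood m rows cols (rows.toNat * cols.toNat) s V₀).1 := by
    rw [hB4, hF5, hset]
  exact Prod.ext hfst hset

-- the inner column scans of A and the reference agree (state congruence)
theorem pvCol_cong (m : List (List Int)) (rows cols : Int)
    (hfuel : (pvAll rows cols).card ≤ rows.toNat * cols.toNat) (r : Int) :
    ∀ (cl : List Int), (∀ c ∈ cl, 0 ≤ c ∧ c < cols) → 0 ≤ r → r < rows →
      ∀ (st : Finset (Int × Int) × List Int),
      cl.foldl
        (fun (st : Finset (Int × Int) × List Int) c =>
          if (r, c) ∉ st.1 ∧ pvCell m r c = 1 then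
            let out := pvBfs m rows cols (rows.toNat * cols.toNat) [(r, c)]
              (insert (r, c) st.1) 0
            (out.2, st.2 ++ [out.1])
          else st) st =
      cl.foldl
        (fun (st : Finset (Int × Int) × List Int) c =>
          if (r, c) ∉ st.1 ∧ pvCell m r c = 1 then
            let out := pvFlood m rows cols (rows.toNat * cols.toNat) (r, c) st.1
            (out.2, st.2 ++ [out.1])
          else st) st := by
  intro cl
  induction cl with
  | nil => intro _ _ _ st; rfl
  | cons c cl' ihc =>
      intro hcl hr0 hr1 st
      have hc := hcl c List.mem_cons_self
      rw [List.foldl_cons, List.foldl_cons]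
      by_cases hcond : (r, c) ∉ st.1 ∧ pvCell m r c = 1
      · have hokc : pvOk m rows cols st.1 (r, c) := by
          refine ⟨?_, hcond.2, hcond.1⟩
          simp only [pvInb, Bool.and_eq_true, decide_eq_true_eq]
          exact ⟨⟨⟨hr0, hr1⟩, hc.1⟩, hc.2⟩
        have hinner := pvInner_eq m rows cols st.1 (r, c) hokc hfuel
        simp only [hcond, hinner]
        exact ihc (fun e he => hcl e (List.mem_cons_of_mem c he)) hr0 hr1 _
      · simp only [hcond]
        exact ihc (fun e he => hcl e (List.mem_cons_of_mem c he)) hr0 hr1 st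

-- the outer row scan of A agrees with the reference nested scan
theorem pvRow_cong (m : List (List Int)) (rows cols : Int)
    (hfuel : (pvAll rows cols).card ≤ rows.toNat * cols.toNat) :
    ∀ (rl : List Int), (∀ r ∈ rl, 0 ≤ r ∧ r < rows) →
      ∀ (st : Finset (Int × Int) × List Int),
      rl.foldl
        (fun (st : Finset (Int × Int) × List Int) r =>
          (PySem.List.pyRange 0 cols 1).foldl
            (fun (st : Finset (Int × Int) × List Int) c =>
              if (r, c) ∉ st.1 ∧ pvCell m r c = 1 then
                let out := pvBfs m rows cols (rows.toNat * cols.toNat) [(r, c)]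
                  (insert (r, c) st.1) 0
                (out.2, st.2 ++ [out.1])
              else st) st) st =
      rl.foldl
        (fun (st : Finset (Int × Int) × List Int) r =>
          (PySem.List.pyRange 0 cols 1).foldl
            (fun (st : Finset (Int × Int) × List Int) c =>
              if (r, c) ∉ st.1 ∧ pvCell m r c = 1 then
                let out := pvFlood m rows cols (rows.toNat * cols.toNat) (r, c) st.1
                (out.2, st.2 ++ [out.1])
              else st) st) st := by
  intro rl
  induction rl with
  | nil => intro _ st; rfl
  | cons r rl' ihr =>
      intro hrl st
      have hr := hrl r List.mem_cons_self
      rw [List.foldl_cons, List.foldl_cons]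
      rw [pvCol_cong m rows cols hfuel r (PySem.List.pyRange 0 cols 1)
        (fun c hc => by
          have := (PySem.List.mem_pyRange_one).mp hc
          exact ⟨this.1, this.2⟩) hr.1 hr.2 st]
      exact ihr (fun e he => hrl e (List.mem_cons_of_mem r he)) _

-- ---- B's port computes the reference flood fill ----

theorem bCell_eq (m : List (List Int)) (r c : Int) : bCell m r c = pvCell m r c := by
  unfold bCell pvCell
  cases h : PySem.List.pyGet? m r
  · simp only [Option.getD_none, PySem.List.pyGet?]
    cases PySem.List.pyIdx? ([] : List Int).length c <;> simp
  · simp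

theorem bAdm_eq (m : List (List Int)) (rows cols : Int) (V : Finset (Int × Int))
    (q : Int × Int) : bAdm m rows cols V q = pvGood m rows cols V q := by
  apply Bool.eq_iff_iff.mpr
  simp only [bAdm, pvGood, pvInb, bCell_eq, Bool.and_eq_true, Bool.not_eq_eq_eq_not,
    Bool.not_true, decide_eq_true_eq, decide_eq_false_iff_not, beq_iff_eq]
  tauto

theorem bNext_eq (p : Int × Int) :
    bNext p = pvDirs.map (fun d => (p.1 + d.1, p.2 + d.2)) := by
  simp only [bNext, pvDirs, List.map_cons, List.map_nil]
  norm_num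
  constructor <;> ring

theorem bNbrs_eq (m : List (List Int)) (rows cols : Int) (f : Nat)
    (hb : ∀ p V, bFlood m rows cols f p V = pvFlood m rows cols f p V) :
    ∀ (L : List (Int × Int)) (size : Int) (V : Finset (Int × Int)),
      bNbrs m rows cols f L size V =
      L.foldl
        (fun (s : Int × Finset (Int × Int)) q =>
          if pvGood m rows cols s.2 q then
            let out := pvFlood m rows cols f q s.2
            (s.1 + out.1, out.2)
          else s) (size, V) := by
  intro L
  induction L with
  | nil => intro size V; simp [bNbrs]
  | cons q qs ih =>
      intro size V
      rw [List.foldl_cons]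
      rw [bNbrs]
      simp only [bAdm_eq, hb]
      by_cases hg : pvGood m rows cols V q = true
      · simp only [hg, if_pos]
        exact ih _ _
      · simp only [Bool.not_eq_true] at hg
        simp only [hg, Bool.false_eq_true, if_false]
        exact ih _ _

theorem bFlood_eq (m : List (List Int)) (rows cols : Int) :
    ∀ (f : Nat) (p : Int × Int) (V : Finset (Int × Int)),
      bFlood m rows cols f p V = pvFlood m rows cols f p V := by
  intro f
  induction f with
  | zero => intro p V; simp [bFlood, pvFlood]
  | succ f ih =>
      intro p V
      rw [bFlood]
      rw [bNbrs_eq m rows cols f ih, bNext_eq, List.foldl_map]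
      rfl

-- ---- B's flat scan computes the reference nested scan ----

theorem bScan_append (m : List (List Int)) (rows cols : Int) (fuel : Nat) :
    ∀ (L1 L2 : List Int) (V : Finset (Int × Int)) (sz : List Int),
      bScan m rows cols fuel (L1 ++ L2) V sz =
      bScan m rows cols fuel L2 (bScan m rows cols fuel L1 V sz).1
        (bScan m rows cols fuel L1 V sz).2 := by
  intro L1
  induction L1 with
  | nil => intro L2 V sz; rfl
  | cons idx rest ih =>
      intro L2 V sz
      rw [List.cons_append]
      simp only [bScan]
      split
      · exact ih _ _ _
      · exact ih _ _ _

theorem bScan_cols (m : List (List Int)) (rows cols : Int) (fuel : Nat)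
    (hcols : 0 < cols) (r : Int) :
    ∀ (n : Nat) (c0 : Int), 0 ≤ c0 → c0 + n = cols →
      ∀ (V : Finset (Int × Int)) (sz : List Int),
      bScan m rows cols fuel (PySem.List.pyRange (r * cols + c0) (r * cols + cols) 1) V sz =
      (PySem.List.pyRange c0 cols 1).foldl
        (fun (st : Finset (Int × Int) × List Int) c =>
          if (r, c) ∉ st.1 ∧ pvCell m r c = 1 then
            let out := pvFlood m rows cols fuel (r, c) st.1
            (out.2, st.2 ++ [out.1])
          else st) (V, sz) := by
  intro n
  induction n with
  | zero =>
      intro c0 h0 hn V sz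
      have hc : c0 = cols := by omega
      subst hc
      rw [PySem.List.pyRange_one_eq_nil (le_refl _), PySem.List.pyRange_one_eq_nil (le_refl _)]
      rfl
  | succ n ih =>
      intro c0 h0 hn V sz
      have hlt : c0 < cols := by omega
      rw [PySem.List.pyRange_one_cons (show r * cols + c0 < r * cols + cols by omega),
        PySem.List.pyRange_one_cons hlt, List.foldl_cons]
      have hdiv : PySem.Int.floordiv (r * cols + c0) cols = r := by
        rw [PySem.Int.floordiv_eq_iff_of_pos hcols]
        constructor
        · linarith
        · have : (r + 1) * cols = r * cols + cols := by ring
          rw [this]; linarith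
      have hmod : PySem.Int.mod (r * cols + c0) cols = c0 := by
        have h := PySem.Int.floordiv_mul_add_mod (r * cols + c0) cols
        rw [hdiv] at h
        linarith
      simp only [bScan, hdiv, hmod]
      have harith : r * cols + c0 + 1 = r * cols + (c0 + 1) := by ring
      have hiff : ((bCell m r c0 == 1 && !(decide ((r, c0) ∈ V))) = true) ↔
          ((r, c0) ∉ V ∧ pvCell m r c0 = 1) := by
        simp only [Bool.and_eq_true, beq_iff_eq, Bool.not_eq_eq_eq_not, Bool.not_true,
          decide_eq_false_iff_not, bCell_eq]
        tauto
      by_cases hcond : (r, c0) ∉ V ∧ pvCell m r c0 = 1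
      · rw [if_pos (hiff.mpr hcond), if_pos hcond, bFlood_eq, harith]
        exact ih (c0 + 1) (by omega) (by omega) _ _
      · rw [if_neg (fun h => hcond (hiff.mp h)), if_neg hcond, harith]
        exact ih (c0 + 1) (by omega) (by omega) _ _

theorem bScan_rows (m : List (List Int)) (rows cols : Int) (fuel : Nat)
    (hcols : 0 < cols) :
    ∀ (n : Nat) (ri : Int), 0 ≤ ri → ri + n = rows →
      ∀ (V : Finset (Int × Int)) (sz : List Int),
      bScan m rows cols fuel (PySem.List.pyRange (ri * cols) (rows * cols) 1) V sz =
      (PySem.List.pyRange ri rows 1).foldl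
        (fun (st : Finset (Int × Int) × List Int) r =>
          (PySem.List.pyRange 0 cols 1).foldl
            (fun (st : Finset (Int × Int) × List Int) c =>
              if (r, c) ∉ st.1 ∧ pvCell m r c = 1 then
                let out := pvFlood m rows cols fuel (r, c) st.1
                (out.2, st.2 ++ [out.1])
              else st) st) (V, sz) := by
  intro n
  induction n with
  | zero =>
      intro ri h0 hn V sz
      obtain rfl : ri = rows := by omega
      rw [PySem.List.pyRange_one_eq_nil (le_refl _), PySem.List.pyRange_one_eq_nil (le_refl _)]
      rfl
  | succ n ih =>
      intro ri h0 hn V sz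
      have hlt : ri < rows := by omega
      have hstep : ri * cols + cols = (ri + 1) * cols := by ring
      have h1 : ri * cols ≤ ri * cols + cols := by omega
      have h2 : ri * cols + cols ≤ rows * cols := by
        rw [hstep]
        exact mul_le_mul_of_nonneg_right (by omega) hcols.le
      rw [PySem.List.pyRange_one_append (ri * cols) (ri * cols + cols) (rows * cols) h1 h2,
        bScan_append, PySem.List.pyRange_one_cons hlt, List.foldl_cons]
      have hc0 := bScan_cols m rows cols fuel hcols ri cols.toNat 0 (le_refl 0)
        (by omega) V sz
      rw [add_zero] at hc0
      rw [hc0, hstep]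
      exact ih (ri + 1) (by omega) (by omega) _ _

-- A's and B's ports return the same list of sizes
theorem river_eq (matrix : List (List Int)) :
    river_sizes_bfs matrix = river_sizes_bfs_alt matrix := by
  match matrix with
  | [] => rfl
  | r0 :: tl =>
      simp only [river_sizes_bfs, river_sizes_bfs_alt]
      by_cases h0 : r0 = []
      · simp [h0]
      · simp only [h0, if_neg, not_false_iff]
        rw [pvRow_cong (r0 :: tl) ((r0 :: tl).length : Int) (r0.length : Int)
          (le_of_eq (pvAll_card _ _)) (PySem.List.pyRange 0 ((r0 :: tl).length : Int) 1)
          (fun r hr => by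
            have := (PySem.List.mem_pyRange_one).mp hr
            exact ⟨this.1, this.2⟩) (∅, [])]
        have hcols : 0 < ((r0.length : Int)) := by
          have : r0.length ≠ 0 := fun h => h0 (List.eq_nil_of_length_eq_zero h)
          omega
        have hB := bScan_rows (r0 :: tl) ((r0 :: tl).length : Int) (r0.length : Int)
          ((((r0 :: tl).length : Int)).toNat * (((r0.length : Int)).toNat)) hcols
          ((r0 :: tl).length) 0 (le_refl 0) (by omega) ∅ []
        rw [zero_mul] at hB
        rw [hB]

-- ===== VERDICT (by name: the statement is the Claim_ definition above) =====
theorem river_sizes_bfs_spec : Claim_equal_river_sizes_bfs := by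
  intro matrix _ _
  unfold Spec_river_sizes_bfs
  exact river_eq matrix
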